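-- pv_equiv track=rewrite | github.com/han-hyeonmin/LLMServingSim | profiler/core/hooks/moe_hook.py | _cycle_expert_ids
-- ===== SOURCE A (Python) =====
-- def _cycle_expert_ids(
--     num_tokens: int,
--     top_k: int,
--     activated_experts: int,
-- ) -> list[list[int]]:
--     """Assign expert ids deterministically so exactly ``activated_experts``
--     distinct ids appear, cycled across the token dimension.
--
--     The specific assignment doesn't matter for latency — only the count
--     of distinct activations does. We use the simplest pattern:
--     ``id = (token_idx * top_k + offset) % activated_experts``.
--     """
--     return [
--         [
--             (token_idx * top_k + offset) % activated_experts
--             for offset in range(top_k)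
--         ]
--         for token_idx in range(num_tokens)
--     ]
-- ===== SOURCE B (Python) =====
-- def _cycle_expert_ids(
--     num_tokens: int,
--     top_k: int,
--     activated_experts: int,
-- ) -> list[list[int]]:
--     if num_tokens <= 0:
--         return []
--     flat = [i % activated_experts for i in range(num_tokens * top_k)]
--     return [flat[i * top_k:(i + 1) * top_k] for i in range(num_tokens)]
-- ===== Notes on version B (the rewrite author's own statement) =====
-- stated objective: alternative
-- what changed: B replaces A's nested double list-comprehension by a single flat generation pass over range(num_tokens*top_k) followed by a reshape that slices the flat list into top_k-sized rows (with an early return for a non-positive token count).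
import Mathlib
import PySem

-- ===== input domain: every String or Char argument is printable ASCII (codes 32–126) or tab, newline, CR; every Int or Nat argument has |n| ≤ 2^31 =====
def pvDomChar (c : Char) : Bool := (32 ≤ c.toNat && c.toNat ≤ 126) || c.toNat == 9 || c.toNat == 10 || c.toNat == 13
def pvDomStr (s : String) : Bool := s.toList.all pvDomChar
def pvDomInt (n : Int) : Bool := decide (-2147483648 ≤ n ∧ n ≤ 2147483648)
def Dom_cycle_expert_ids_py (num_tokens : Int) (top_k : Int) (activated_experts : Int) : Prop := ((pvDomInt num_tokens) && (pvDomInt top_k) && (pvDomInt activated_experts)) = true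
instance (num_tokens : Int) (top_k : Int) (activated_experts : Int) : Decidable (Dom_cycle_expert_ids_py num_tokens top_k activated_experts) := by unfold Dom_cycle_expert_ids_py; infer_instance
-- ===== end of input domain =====

-- B builds the grid as one flat cyclic list reshaped into rows, instead of A's nested
-- comprehension; an alternative decomposition of the same cost (return value proved equal).

-- ===== PORT A =====
def cycle_expert_ids_py (num_tokens : Int) (top_k : Int) (activated_experts : Int) : List (List Int) :=
  (PySem.List.pyRange 0 num_tokens 1).map (fun token_idx =>
    (PySem.List.pyRange 0 top_k 1).map (fun offset =>
      PySem.Int.mod (token_idx * top_k + offset) activated_experts))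

-- ===== PORT B =====
def cycle_expert_ids_py_alt (num_tokens : Int) (top_k : Int) (activated_experts : Int) : List (List Int) :=
  if num_tokens ≤ 0 then []
  else
    let flat := (PySem.List.pyRange 0 (num_tokens * top_k) 1).map
      (fun i => PySem.Int.mod i activated_experts)
    (PySem.List.pyRange 0 num_tokens 1).map
      (fun i => PySem.List.slice flat (some (i * top_k)) (some ((i + 1) * top_k)))

-- ===== PRECONDITION & SPEC =====
-- Pre_ excludes exactly the inputs where Python raises ZeroDivisionError:
-- activated_experts = 0 while at least one modulo is evaluated (num_tokens > 0 and top_k > 0).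
def Pre_cycle_expert_ids_py (num_tokens : Int) (top_k : Int) (activated_experts : Int) : Prop :=
  activated_experts ≠ 0 ∨ num_tokens ≤ 0 ∨ top_k ≤ 0
instance (num_tokens : Int) (top_k : Int) (activated_experts : Int) : Decidable (Pre_cycle_expert_ids_py num_tokens top_k activated_experts) := by unfold Pre_cycle_expert_ids_py; infer_instance

def pvWitness_cycle_expert_ids_py : Int × Int × Int := (3, 2, 4)

def Spec_cycle_expert_ids_py (num_tokens : Int) (top_k : Int) (activated_experts : Int) (out : List (List Int)) : Prop := out = cycle_expert_ids_py_alt num_tokens top_k activated_experts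
instance (num_tokens : Int) (top_k : Int) (activated_experts : Int) (out : List (List Int)) : Decidable (Spec_cycle_expert_ids_py num_tokens top_k activated_experts out) := by unfold Spec_cycle_expert_ids_py; infer_instance

-- ===== CLAIM (what is proved, stated in full; the proofs are below) =====
def Claim_equal_cycle_expert_ids_py : Prop := ∀ (num_tokens : Int) (top_k : Int) (activated_experts : Int), Dom_cycle_expert_ids_py num_tokens top_k activated_experts → Pre_cycle_expert_ids_py num_tokens top_k activated_experts → Spec_cycle_expert_ids_py num_tokens top_k activated_experts (cycle_expert_ids_py num_tokens top_k activated_experts)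

-- ===== LEMMAS AND PROOFS =====

-- any slice of the empty list is empty
theorem pv_slice_nil {α : Type} (a? b? : Option Int) : PySem.List.slice ([] : List α) a? b? = [] :=
  List.eq_nil_iff_forall_not_mem.mpr fun _ hx => by
    simpa using PySem.List.mem_of_mem_slice _ _ _ hx

-- a shifted unit range is the map of the base range
theorem pv_pyRange_shift (c t : Int) :
    PySem.List.pyRange c (c + t) 1 = (PySem.List.pyRange 0 t 1).map (fun o => c + o) := by
  apply List.ext_getElem
  · simp [PySem.List.length_pyRange_one]
  · intro k h1 h2
    simp [PySem.List.getElem_pyRange_one]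

-- the i-th row of B's reshape equals A's i-th row
theorem pv_row_eq (num_tokens top_k activated_experts i : Int)
    (h0 : 0 ≤ i) (h1 : i < num_tokens) :
    PySem.List.slice
      ((PySem.List.pyRange 0 (num_tokens * top_k) 1).map
        (fun j => PySem.Int.mod j activated_experts))
      (some (i * top_k)) (some ((i + 1) * top_k))
    = (PySem.List.pyRange 0 top_k 1).map
        (fun offset => PySem.Int.mod (i * top_k + offset) activated_experts) := by
  by_cases htk : top_k ≤ 0
  · rw [PySem.List.pyRange_one_eq_nil (by nlinarith : num_tokens * top_k ≤ 0)]
    rw [PySem.List.pyRange_one_eq_nil htk]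
    simp [pv_slice_nil]
  · replace htk : 0 < top_k := by omega
    have ha : (0:Int) ≤ i * top_k := by positivity
    have hb : (0:Int) ≤ (i + 1) * top_k := by positivity
    have hsplit : PySem.List.pyRange 0 (num_tokens * top_k) 1
        = PySem.List.pyRange 0 (i * top_k) 1
          ++ (PySem.List.pyRange (i * top_k) ((i + 1) * top_k) 1
              ++ PySem.List.pyRange ((i + 1) * top_k) (num_tokens * top_k) 1) := by
      rw [← PySem.List.pyRange_one_append (i * top_k) ((i + 1) * top_k) (num_tokens * top_k)
            (by nlinarith) (by nlinarith),
          ← PySem.List.pyRange_one_append 0 (i * top_k) (num_tokens * top_k) ha (by nlinarith)]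
    rw [PySem.List.slice_toNat _ ha hb, hsplit]
    rw [List.map_append, List.map_append]
    rw [List.drop_append_of_le_length (by simp [PySem.List.length_pyRange_one])]
    rw [show ((PySem.List.pyRange 0 (i * top_k) 1).map
          (fun j => PySem.Int.mod j activated_experts)).drop (i * top_k).toNat = [] by
      apply List.drop_eq_nil_of_le; simp [PySem.List.length_pyRange_one]]
    rw [List.nil_append,
        List.take_append_of_le_length (by
          simp [PySem.List.length_pyRange_one]; omega)]
    have harith : ((i + 1) * top_k).toNat - (i * top_k).toNat = top_k.toNat := by
      have : (i + 1) * top_k = i * top_k + top_k := by ring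
      omega
    rw [harith]
    rw [show PySem.List.pyRange (i * top_k) ((i + 1) * top_k) 1
          = (PySem.List.pyRange 0 top_k 1).map (fun o => i * top_k + o) by
      have : (i + 1) * top_k = i * top_k + top_k := by ring
      rw [this]; exact pv_pyRange_shift _ _]
    rw [List.map_map]
    rw [List.take_of_length_le (by simp [PySem.List.length_pyRange_one])]
    rfl

-- ===== VERDICT (by name: the statement is the Claim_ definition above) =====
theorem cycle_expert_ids_py_spec : Claim_equal_cycle_expert_ids_py := by
  intro num_tokens top_k activated_experts _ _
  unfold Spec_cycle_expert_ids_py cycle_expert_ids_py cycle_expert_ids_py_alt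
  by_cases hn : num_tokens ≤ 0
  · simp [hn, PySem.List.pyRange_one_eq_nil hn]
  · simp only [hn, if_false]
    apply List.map_congr_left
    intro i hi
    rw [PySem.List.mem_pyRange_one] at hi
    exact (pv_row_eq num_tokens top_k activated_experts i hi.1 hi.2).symm
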